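-- pv_equiv track=rewrite | github.com/adagrad/findb_dolthub | pull/commands/yfinance/symbols.py | _brute_force_symbols
-- ===== SOURCE A (Python) =====
-- first_search_characters = 'abcdefghijklmnopqrstuvwxyz^'
--
-- general_search_characters = '012.ap5csnb63v47t8xem9flidgurqhokzwyj=+'
--
-- def _brute_force_symbols(max_len=4):
--     symbols = []
--
--     def add_character(s):
--         for c in general_search_characters:
--             _next = s + c
--             yield _next
--             if (len(_next)) < max_len:
--                 for _s in add_character(_next):
--                     yield _s
--
--     for fc in first_search_characters:
--         symbols.append(fc)
--         for s in add_character(fc):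
--             symbols.append(s)
--
--     return set(symbols)
-- ===== SOURCE B (Python) =====
-- first_search_characters = 'abcdefghijklmnopqrstuvwxyz^'
--
-- general_search_characters = '012.ap5csnb63v47t8xem9flidgurqhokzwyj=+'
--
--
-- def _brute_force_symbols(max_len=4):
--     # Iterative DFS with an explicit stack instead of a recursive generator.
--     # A 1-char seed is always extended once, so the effective depth limit is max(max_len, 2).
--     limit = max(max_len, 2)
--     symbols = set()
--     for fc in first_search_characters:
--         stack = [fc]
--         while stack:
--             s = stack.pop()
--             symbols.add(s)
--             if len(s) < limit:
--                 for c in reversed(general_search_characters):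
--                     stack.append(s + c)
--     return symbols
-- ===== Notes on version B (the rewrite author's own statement) =====
-- stated objective: alternative
-- what changed: Replaces the recursive generator DFS (add_character yielding recursively) with an iterative depth-first traversal over an explicit stack, pushing children in reverse so the same strings are produced in the same order; the depth cap is expressed once as max(max_len, 2).
import Mathlib
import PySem

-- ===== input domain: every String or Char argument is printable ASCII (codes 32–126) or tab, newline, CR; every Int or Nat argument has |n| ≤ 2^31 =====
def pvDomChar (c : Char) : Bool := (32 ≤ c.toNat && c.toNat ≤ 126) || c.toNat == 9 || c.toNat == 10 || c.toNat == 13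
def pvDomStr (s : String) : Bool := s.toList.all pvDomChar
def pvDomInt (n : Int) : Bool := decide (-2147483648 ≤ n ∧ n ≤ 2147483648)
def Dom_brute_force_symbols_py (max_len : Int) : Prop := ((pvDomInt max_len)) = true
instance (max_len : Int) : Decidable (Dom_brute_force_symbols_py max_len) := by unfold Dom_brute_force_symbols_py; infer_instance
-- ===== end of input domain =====

-- B replaces A's recursive generator DFS by an iterative DFS over an explicit stack (same set, same order); objective: alternative decomposition, not speed.

-- ===== PORT A =====
-- Strings are ported as List Char (exact: ++ and length on List Char are Python's + and len on str).
def pvFsc : List Char := "abcdefghijklmnopqrstuvwxyz^".toList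
def pvGsc : List Char := "012.ap5csnb63v47t8xem9flidgurqhokzwyj=+".toList

-- add_character(s): the 'for c in general_search_characters' loop is the flatMap; the recursive
-- 'yield from add_character(_next)' is the recursive call.  The Nat fuel is only a totality guard:
-- the recursion stops by itself once len(_next) < max_len fails, and the fuel supplied at the call
-- site (max_len.toNat + 1) is proved never to run out first.
def pvAddChar (max_len : Int) : Nat → List Char → List (List Char)
  | 0, _ => []
  | fuel + 1, s =>
    pvGsc.flatMap (fun c =>
      let nx := s ++ [c]
      nx :: (if (nx.length : Int) < max_len then pvAddChar max_len fuel nx else []))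

def brute_force_symbols_py (max_len : Int) : List String :=
  PySem.Set.ofList
    ((pvFsc.flatMap (fun fc => [fc] :: pvAddChar max_len (max_len.toNat + 1) [fc])).map
      (fun cs => String.ofList cs))

-- ===== PORT B =====
-- fuel bound for the stack loop: the number of nodes in the DFS tree below a string of length len
-- (one pop per node); the Nat argument is again only a totality guard
def pvSizeN (limit : Int) : Nat → Nat → Nat
  | 0, _ => 1
  | f + 1, len => if (len : Int) < limit then 1 + pvGsc.length * pvSizeN limit f (len + 1) else 1

-- the 'while stack:' loop; pushing s+c for c in reversed(gsc) leaves the children on top in gsc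
-- order, so the stack after the pushes is (children in order) ++ rest; the fuel counts loop
-- iterations (pops) and is proved sufficient at the call site
def pvRun (limit : Int) : Nat → List (List Char) → List (List Char)
  | _, [] => []
  | 0, _ :: _ => []
  | f + 1, s :: rest =>
    s :: pvRun limit f
      ((if (s.length : Int) < limit then pvGsc.map (fun c => s ++ [c]) else []) ++ rest)

def brute_force_symbols_py_alt (max_len : Int) : List String :=
  let limit := max max_len 2
  pvFsc.foldl
    (fun symbols fc =>
      PySem.Set.update symbols
        ((pvRun limit (pvSizeN limit limit.toNat 1) [[fc]]).map (fun cs => String.ofList cs)))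
    PySem.Set.empty

-- ===== PRECONDITION & SPEC =====
def Spec_brute_force_symbols_py (max_len : Int) (out : List String) : Prop := out = brute_force_symbols_py_alt max_len
instance (max_len : Int) (out : List String) : Decidable (Spec_brute_force_symbols_py max_len out) := by unfold Spec_brute_force_symbols_py; infer_instance

-- ===== CLAIM (what is proved, stated in full; the proofs are below) =====
def Claim_equal_brute_force_symbols_py : Prop := ∀ (max_len : Int), Dom_brute_force_symbols_py max_len → Spec_brute_force_symbols_py max_len (brute_force_symbols_py max_len)

-- ===== LEMMAS AND PROOFS =====

-- proof-side ideal add_character (no fuel; well-founded on the remaining depth): pvACW ml s cs is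
-- the list A's generator yields for the suffix cs of the alphabet at seed s
def pvACW (max_len : Int) (s : List Char) (cs : List Char) : List (List Char) :=
  match cs with
  | [] => []
  | c :: rest =>
    ((s ++ [c]) :: (if h : ((s ++ [c]).length : Int) < max_len then pvACW max_len (s ++ [c]) pvGsc else []))
      ++ pvACW max_len s rest
termination_by ((max_len - s.length).toNat, cs.length)
decreasing_by
  · apply Prod.Lex.left
    have h' : (((s ++ [c]).length : Nat) : Int) < max_len := h
    have hl : (s ++ [c]).length = s.length + 1 := by simp
    omega
  · apply Prod.Lex.right; simp

-- proof-side exact subtree size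
def pvTreeSz (limit : Int) (len : Nat) : Nat := pvSizeN limit (limit - len).toNat len

theorem sizeN_stable (limit : Int) (f : Nat) : ∀ (g : Nat) (len : Nat),
    (limit - len).toNat ≤ f → (limit - len).toNat ≤ g →
    pvSizeN limit f len = pvSizeN limit g len := by
  induction f with
  | zero =>
    intro g len hf _
    have hc : ¬ (len : Int) < limit := by omega
    cases g with
    | zero => rfl
    | succ g' => rw [pvSizeN, pvSizeN, if_neg hc]
  | succ f' ih =>
    intro g len hf hg
    by_cases hc : (len : Int) < limit
    · have hg1 : ∃ g', g = g' + 1 := by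
        cases g with
        | zero => exfalso; omega
        | succ g' => exact ⟨g', rfl⟩
      obtain ⟨g', rfl⟩ := hg1
      rw [pvSizeN, pvSizeN, if_pos hc, if_pos hc,
        ih g' (len + 1) (by omega) (by omega)]
    · cases g with
      | zero => rw [pvSizeN, pvSizeN, if_neg hc]
      | succ g' => rw [pvSizeN, pvSizeN, if_neg hc, if_neg hc]

theorem treeSz_pos (limit : Int) (len : Nat) : 1 ≤ pvTreeSz limit len := by
  unfold pvTreeSz
  cases h : (limit - len).toNat with
  | zero => rw [pvSizeN]
  | succ f => rw [pvSizeN]; split <;> omega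

theorem treeSz_rec (limit : Int) (len : Nat) (h : (len : Int) < limit) :
    pvTreeSz limit len = 1 + pvGsc.length * pvTreeSz limit (len + 1) := by
  unfold pvTreeSz
  have hk : (limit - len).toNat = (limit - (len + 1)).toNat + 1 := by omega
  rw [hk, pvSizeN, if_pos h]
  norm_cast

-- A's fuelled add_character computes the ideal one whenever the fuel dominates the remaining depth
theorem addChar_fuel (max_len : Int) : ∀ (fuel : Nat) (s cs : List Char),
    (max_len - s.length).toNat ≤ fuel →
    (cs.flatMap (fun c =>
        (s ++ [c]) :: (if ((s ++ [c]).length : Int) < max_len then pvAddChar max_len fuel (s ++ [c]) else [])))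
      = pvACW max_len s cs := by
  intro fuel
  induction fuel with
  | zero =>
    intro s cs h0
    induction cs with
    | nil => rw [pvACW]; simp
    | cons c rest ihc =>
      rw [pvACW, List.flatMap_cons, ihc]
      have hc : ¬ ((s ++ [c]).length : Int) < max_len := by
        have hl : (s ++ [c]).length = s.length + 1 := by simp
        omega
      rw [if_neg hc, dif_neg hc]
  | succ f ihf =>
    intro s cs h
    induction cs with
    | nil => rw [pvACW]; simp
    | cons c rest ihc =>
      rw [pvACW, List.flatMap_cons, ihc]
      have hl : (s ++ [c]).length = s.length + 1 := by simp
      by_cases hc : ((s ++ [c]).length : Int) < max_len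
      · rw [if_pos hc, dif_pos hc, pvAddChar, ihf (s ++ [c]) pvGsc (by omega)]
      · rw [if_neg hc, dif_neg hc]

-- expanding each child of s one step (emit, then maybe its subtree) is exactly pvACW
theorem flatMap_children_eq_acw (limit : Int) (cs : List Char) (s : List Char) :
    ((cs.map (fun c => s ++ [c])).flatMap
        (fun t => t :: (if (t.length : Int) < limit then pvACW limit t pvGsc else [])))
      = pvACW limit s cs := by
  induction cs with
  | nil => rw [pvACW]; simp
  | cons c rest ih =>
    rw [pvACW]
    simp only [List.map_cons, List.flatMap_cons]
    rw [ih]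
    split <;> simp

-- the stack loop lists, in order, each stack entry followed by its DFS subtree, provided the fuel
-- covers the total number of pops
theorem run_eq_flatMap (limit : Int) : ∀ (f : Nat) (stack : List (List Char)),
    (stack.map (fun s => pvTreeSz limit s.length)).sum ≤ f →
    pvRun limit f stack
      = stack.flatMap
          (fun s => s :: (if (s.length : Int) < limit then pvACW limit s pvGsc else [])) := by
  intro f
  induction f with
  | zero =>
    intro stack h0
    cases stack with
    | nil => rw [pvRun]; simp
    | cons s rest =>
      exfalso
      have h1 := treeSz_pos limit s.length
      simp only [List.map_cons, List.sum_cons] at h0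
      omega
  | succ g ih =>
    intro stack h
    cases stack with
    | nil => rw [pvRun]; simp
    | cons s rest =>
      rw [pvRun]
      simp only [List.map_cons, List.sum_cons] at h
      simp only [List.flatMap_cons, List.cons_append]
      by_cases hc : (s.length : Int) < limit
      · have hsum : ((pvGsc.map (fun c => s ++ [c])).map (fun t => pvTreeSz limit t.length)).sum
            = pvGsc.length * pvTreeSz limit (s.length + 1) := by
          rw [List.map_map]
          have hcomp : ((fun t : List Char => pvTreeSz limit t.length) ∘ fun c => s ++ [c])
              = fun _ => pvTreeSz limit (s.length + 1) := by
            funext c; simp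
          rw [hcomp]
          simp [List.map_const', List.sum_replicate]
        have hrec := treeSz_rec limit s.length hc
        rw [if_pos hc, ih _ (by
          simp only [List.map_append, List.sum_append]
          rw [hsum]
          omega)]
        rw [List.flatMap_append, if_pos hc, flatMap_children_eq_acw]
      · rw [if_neg hc, ih _ (by
          have h1 := treeSz_pos limit s.length
          simp only [List.nil_append]
          omega)]
        rw [if_neg hc]
        simp

-- below length-1 seeds all strings have length ≥ 2, where 'len < max_len' and 'len < max(max_len,2)' agree
theorem acw_max_two (max_len : Int) (s : List Char) (cs : List Char)
    (hs : 1 ≤ s.length) :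
    pvACW max_len s cs = pvACW (max max_len 2) s cs := by
  fun_induction pvACW max_len s cs with
  | case1 => rw [pvACW]
  | case2 s c rest ihnx ihrest =>
    rw [pvACW]
    have hlen : (s ++ [c]).length = s.length + 1 := by simp
    by_cases h : ((s ++ [c]).length : Int) < max_len
    · have h2 : ((s ++ [c]).length : Int) < max max_len 2 := lt_of_lt_of_le h (le_max_left _ _)
      rw [dif_pos h, dif_pos h2, ihnx h (by omega), ihrest hs]
    · have h2 : ¬ ((s ++ [c]).length : Int) < max max_len 2 := by omega
      rw [dif_neg h, dif_neg h2, ihrest hs]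

-- folding set-updates over a list is one set-update by the concatenation
theorem foldl_update_eq_update_flatMap {α β : Type} [BEq α]
    (g : β → List α) (xs : List β) (init : PySem.Set α) :
    xs.foldl (fun acc x => PySem.Set.update acc (g x)) init
      = PySem.Set.update init (xs.flatMap g) := by
  induction xs generalizing init with
  | nil => simp [PySem.Set.update]
  | cons x rest ih =>
    rw [List.foldl_cons, ih, List.flatMap_cons, PySem.Set.update, PySem.Set.update,
      PySem.Set.update, List.foldl_append]

-- the DFS emitted from one seed fc equals A's 'fc then add_character(fc)' block
theorem run_seed (max_len : Int) (fc : Char) :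
    pvRun (max max_len 2) (pvSizeN (max max_len 2) (max max_len 2).toNat 1) [[fc]]
      = [fc] :: pvAddChar max_len (max_len.toNat + 1) [fc] := by
  have hfuel : ((([[fc]] : List (List Char)).map
      (fun s => pvTreeSz (max max_len 2) s.length)).sum)
        ≤ pvSizeN (max max_len 2) (max max_len 2).toNat 1 := by
    simp only [List.map_cons, List.map_nil, List.sum_cons, List.sum_nil, List.length_cons,
      List.length_nil]
    unfold pvTreeSz
    rw [sizeN_stable (max max_len 2) ((max max_len 2) - (1 : Nat)).toNat ((max max_len 2).toNat) 1
      (le_refl _) (by omega)]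
    omega
  rw [run_eq_flatMap (max max_len 2) _ [[fc]] hfuel]
  have h1 : (([fc] : List Char).length : Int) < max max_len 2 := by
    have h2 : (2 : Int) ≤ max max_len 2 := le_max_right _ _
    simp only [List.length_cons, List.length_nil]
    omega
  simp only [List.flatMap_cons, List.flatMap_nil, List.append_nil, if_pos h1]
  rw [← acw_max_two max_len [fc] pvGsc (by simp)]
  rw [pvAddChar, addChar_fuel max_len max_len.toNat [fc] pvGsc (by simp only [List.length_cons, List.length_nil]; omega)]

-- ===== VERDICT (by name: the statement is the Claim_ definition above) =====
theorem brute_force_symbols_py_spec : Claim_equal_brute_force_symbols_py := by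
  intro max_len _
  unfold Spec_brute_force_symbols_py brute_force_symbols_py brute_force_symbols_py_alt
  rw [foldl_update_eq_update_flatMap]
  have hlists :
      (pvFsc.flatMap fun fc =>
        (pvRun (max max_len 2) (pvSizeN (max max_len 2) (max max_len 2).toNat 1) [[fc]]).map
          (fun cs => String.ofList cs))
      = (pvFsc.flatMap (fun fc => [fc] :: pvAddChar max_len (max_len.toNat + 1) [fc])).map
          (fun cs => String.ofList cs) := by
    rw [List.map_flatMap]
    exact List.flatMap_congr (fun fc _ => by rw [run_seed])
  rw [hlists]
  rfl
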